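-- pv_equiv track=rewrite | github.com/illinois-or-research-analytics/network_evaluation | imagine_something_like_this/compute_stats.py | get_cluster_size_distr
-- ===== SOURCE A (Python) =====
-- def get_cluster_size_distr(clustering_dict):
--     cluster_size_dict = {}
--     for cluster in clustering_dict.values():
--         cluster_size_dict[cluster] = cluster_size_dict.get(cluster, 0) + 1
--     cluster_size_distr = []
--     for i in range(len(cluster_size_dict.keys())):
--         cluster_size_distr.append(cluster_size_dict.get(i))
--     return cluster_size_distr
-- ===== SOURCE B (Python) =====
-- def get_cluster_size_distr(clustering_dict):
--     # sort-and-group: one linear scan over the sorted values counts each run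
--     vals = sorted(clustering_dict.values())
--     sizes = {}
--     if vals:
--         x, run = vals[0], 1
--         for v in vals[1:]:
--             if v == x:
--                 run += 1
--             else:
--                 sizes[x] = run
--                 x, run = v, 1
--         sizes[x] = run
--     return [sizes.get(k) for k in range(len(sizes))]
-- ===== Notes on version B (the rewrite author's own statement) =====
-- stated objective: alternative
-- what changed: Replaces the hash-based get/increment counting loop by a sort-then-scan: sort the values, count consecutive equal runs to build the size map, then index it over range(len(sizes)).
import Mathlib
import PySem

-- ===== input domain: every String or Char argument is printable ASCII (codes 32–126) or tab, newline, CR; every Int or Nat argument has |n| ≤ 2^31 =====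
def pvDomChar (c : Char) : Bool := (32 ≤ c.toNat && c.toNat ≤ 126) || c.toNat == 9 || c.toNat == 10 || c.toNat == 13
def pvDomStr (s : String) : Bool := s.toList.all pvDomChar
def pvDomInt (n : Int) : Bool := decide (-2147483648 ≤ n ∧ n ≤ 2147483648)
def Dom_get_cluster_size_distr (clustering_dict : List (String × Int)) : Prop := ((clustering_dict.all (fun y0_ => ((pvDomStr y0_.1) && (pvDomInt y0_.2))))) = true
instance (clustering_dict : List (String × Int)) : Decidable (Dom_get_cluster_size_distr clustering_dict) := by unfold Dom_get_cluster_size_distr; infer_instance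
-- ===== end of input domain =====

-- B replaces A's dict get/increment counting by sort-then-count-consecutive-runs; same outputs (alternative decomposition, not faster).

-- ===== PORT A =====
def get_cluster_size_distr (clustering_dict : List (String × Int)) : List (Option Int) :=
  let cluster_size_dict :=
    (clustering_dict.map (·.2)).foldl
      (fun d cluster => d.insert cluster (d.getD cluster 0 + 1)) PySem.Dict.empty
  (PySem.List.pyRange 0 (cluster_size_dict.keys.length : Int) 1).foldl
    (fun acc i => acc ++ [cluster_size_dict.get? i]) ([] : List (Option Int))

-- ===== PORT B =====
-- the scan of Source B: carry the current run (x, run); on a new value emit the finished run, emit the last run at the end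
def pvRunsAux (x run : Int) : List Int → List (Int × Int)
  | [] => [(x, run)]
  | v :: vs => if v == x then pvRunsAux x (run + 1) vs else (x, run) :: pvRunsAux v 1 vs

-- the 'if vals:' guard: runs of the whole (sorted) list, in order
def pvRuns : List Int → List (Int × Int)
  | [] => []
  | x :: xs => pvRunsAux x 1 xs

def get_cluster_size_distr_alt (clustering_dict : List (String × Int)) : List (Option Int) :=
  let sizes :=
    (pvRuns (PySem.List.sorted (clustering_dict.map (·.2)) (fun x => x) false)).foldl
      (fun d p => d.insert p.1 p.2) PySem.Dict.empty
  (PySem.List.pyRange 0 (sizes.size : Int) 1).map (fun i => sizes.get? i)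

-- ===== PRECONDITION & SPEC =====
def Spec_get_cluster_size_distr (clustering_dict : List (String × Int)) (out : List (Option Int)) : Prop := out = get_cluster_size_distr_alt clustering_dict
instance (clustering_dict : List (String × Int)) (out : List (Option Int)) : Decidable (Spec_get_cluster_size_distr clustering_dict out) := by unfold Spec_get_cluster_size_distr; infer_instance

-- ===== CLAIM (what is proved, stated in full; the proofs are below) =====
def Claim_equal_get_cluster_size_distr : Prop := ∀ (clustering_dict : List (String × Int)), Dom_get_cluster_size_distr clustering_dict → Spec_get_cluster_size_distr clustering_dict (get_cluster_size_distr clustering_dict)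

-- ===== LEMMAS AND PROOFS =====

-- invariant of the run scan on a sorted tail bounded below by the current run value
lemma pvRunsAux_sound : ∀ (xs : List Int) (x c : Int), xs.Pairwise (· ≤ ·) → (∀ z ∈ xs, x ≤ z) →
    ((pvRunsAux x c xs).map Prod.fst).Nodup ∧
    (∀ p ∈ pvRunsAux x c xs,
      (p.1 = x ∨ p.1 ∈ xs) ∧ p.2 = (if p.1 = x then c else 0) + (xs.count p.1 : Int)) ∧
    (∀ i : Int, (i = x ∨ i ∈ xs) ↔ i ∈ (pvRunsAux x c xs).map Prod.fst) := by
  intro xs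
  induction xs with
  | nil =>
    intro x c _ _
    refine ⟨by simp [pvRunsAux], ?_, by simp [pvRunsAux]⟩
    intro p hp
    simp [pvRunsAux] at hp
    subst hp
    simp
  | cons y ys ih =>
    intro x c h hge
    rw [List.pairwise_cons] at h
    obtain ⟨hy, hys⟩ := h
    by_cases hxy : y = x
    · subst hxy
      have := ih y (c + 1) hys hy
      obtain ⟨h1, h2, h3⟩ := this
      refine ⟨by simpa [pvRunsAux] using h1, ?_, ?_⟩
      · intro p hp
        simp only [pvRunsAux, BEq.rfl, if_true] at hp
        obtain ⟨hm, hv⟩ := h2 p hp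
        constructor
        · rcases hm with h | h
          · exact Or.inl h
          · exact Or.inr (List.mem_cons_of_mem _ h)
        · rw [hv]
          by_cases hpy : p.1 = y <;> simp [hpy, List.count_cons] <;> omega
      · intro i
        simp only [pvRunsAux, BEq.rfl, if_true]
        rw [← h3 i]
        simp only [List.mem_cons]
        tauto
    · have hxlt : x < y := lt_of_le_of_ne (hge y (List.mem_cons_self)) (Ne.symm hxy)
      have hgt : ∀ z, z = y ∨ z ∈ ys → x < z := by
        intro z hz
        rcases hz with rfl | hz
        · exact hxlt
        · exact lt_of_lt_of_le hxlt (hy z hz)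
      obtain ⟨h1, h2, h3⟩ := ih y 1 hys hy
      have hne : ∀ i : Int, i ∈ (pvRunsAux y 1 ys).map Prod.fst → i ≠ x := by
        intro i hi
        exact ne_of_gt (hgt i ((h3 i).mpr hi))
      have hbne : (y == x) = false := by simp [hxy]
      have hcx : ys.count x = 0 := by
        rw [List.count_eq_zero]
        intro hx
        exact absurd rfl (ne_of_gt (hgt x (Or.inr hx)))
      refine ⟨?_, ?_, ?_⟩
      · simp only [pvRunsAux, hbne, Bool.false_eq_true, if_false, List.map_cons, List.nodup_cons]
        exact ⟨fun hx => hne x hx rfl, h1⟩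
      · intro p hp
        simp only [pvRunsAux, hbne, Bool.false_eq_true, if_false, List.mem_cons] at hp
        rcases hp with rfl | hp
        · simp [hxy, Ne.symm hxy, hcx]
        · obtain ⟨hm, hv⟩ := h2 p hp
          have hpx : p.1 ≠ x := hne p.1 (List.mem_map_of_mem hp)
          constructor
          · right
            simpa using hm
          · rw [hv]
            by_cases hpy : p.1 = y <;> simp [hpx, hpy, List.count_cons] <;> omega
      · intro i
        simp only [pvRunsAux, hbne, Bool.false_eq_true, if_false, List.map_cons, List.mem_cons]
        rw [← h3 i]
-- soundness of the whole scan on a sorted list: keys Nodup, every pair is (member, its count), all members appear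
lemma pvRuns_sound (s : List Int) (hs : s.Pairwise (· ≤ ·)) :
    ((pvRuns s).map Prod.fst).Nodup ∧
    (∀ p ∈ pvRuns s, p.1 ∈ s ∧ p.2 = (s.count p.1 : Int)) ∧
    (∀ i : Int, i ∈ s ↔ i ∈ (pvRuns s).map Prod.fst) := by
  cases s with
  | nil => simp [pvRuns]
  | cons x xs =>
    rw [List.pairwise_cons] at hs
    obtain ⟨h1, h2, h3⟩ := pvRunsAux_sound xs x 1 hs.2 hs.1
    refine ⟨by simpa [pvRuns] using h1, ?_, ?_⟩
    · intro p hp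
      simp only [pvRuns] at hp
      obtain ⟨hm, hv⟩ := h2 p hp
      refine ⟨by simpa using hm, ?_⟩
      rw [hv]
      by_cases hpx : p.1 = x <;> simp [hpx, List.count_cons] <;> omega
    · intro i
      simp only [pvRuns, List.mem_cons]
      rw [← h3 i]

-- the whole equivalence, as a plain equation
lemma pv_main (cd : List (String × Int)) : get_cluster_size_distr cd = get_cluster_size_distr_alt cd := by
  simp only [get_cluster_size_distr, get_cluster_size_distr_alt]
  rw [PySem.List.foldl_append_singleton_eq_map, List.nil_append,
      PySem.Dict.foldl_insert_getD_add_one_eq_counter]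
  set vs := cd.map (·.2) with hvs
  set s := PySem.List.sorted vs (fun x => x) false with hs
  have hperm : s.Perm vs := PySem.List.sorted_perm vs (fun x => x) false
  have hsort : s.Pairwise (· ≤ ·) := PySem.List.sorted_pairwise vs (fun x => x)
  obtain ⟨hnd, hpairs, hmem⟩ := pvRuns_sound s hsort
  set dB := (pvRuns s).foldl (fun d p => d.insert p.1 p.2) PySem.Dict.empty with hdB
  have hitems : dB.items = pvRuns s := by
    rw [hdB, PySem.Dict.items_foldl_insert_fresh (pvRuns s) Prod.fst Prod.snd PySem.Dict.empty
          (by intro a _; exact PySem.Dict.contains_empty _) hnd]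
    simp [PySem.Dict.empty]
  have hkeysB : dB.keys = (pvRuns s).map Prod.fst := by
    simp only [PySem.Dict.keys, hitems]
  have hndB : dB.keys.Nodup := by rw [hkeysB]; exact hnd
  have hsize : dB.size = (pvRuns s).length := by
    simp only [PySem.Dict.size, hitems]
  have hlen : (PySem.Dict.counter vs).keys.length = dB.size := by
    rw [PySem.Dict.keys_counter, hsize]
    have : (PySem.Set.ofList vs).Perm ((pvRuns s).map Prod.fst) := by
      rw [List.perm_ext_iff_of_nodup (PySem.Set.nodup_ofList vs) hnd]
      intro a
      rw [PySem.Set.mem_ofList, ← hperm.mem_iff, hmem]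
    simpa using this.length_eq
  have hget : ∀ i : Int, (PySem.Dict.counter vs).get? i = dB.get? i := by
    intro i
    by_cases hi : i ∈ vs
    · have his : i ∈ s := hperm.mem_iff.mpr hi
      obtain ⟨p, hp, hpi⟩ := List.mem_map.mp ((hmem i).mp his)
      obtain ⟨hpmem, hpv⟩ := hpairs p hp
      have hpeq : (i, p.2) = p := by cases p; simp_all
      have hB : dB.get? i = some p.2 :=
        PySem.Dict.get?_of_mem_items dB (by rw [hitems, hpeq]; exact hp) hndB
      have hA : (PySem.Dict.counter vs).get? i = some ((vs.count i : Int)) :=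
        PySem.Dict.get?_of_mem_items _
          (by rw [PySem.Dict.items_counter]
              exact List.mem_map.mpr ⟨i, (PySem.Set.mem_ofList vs i).mpr hi, rfl⟩)
          (PySem.Dict.nodup_keys_counter vs)
      rw [hA, hB, hpv, hpi, hperm.count_eq]
    · have hA : (PySem.Dict.counter vs).get? i = none := by
        rw [PySem.Dict.get?_eq_none_iff_not_mem_keys, PySem.Dict.keys_counter,
            PySem.Set.mem_ofList]
        exact hi
      have hB : dB.get? i = none := by
        rw [PySem.Dict.get?_eq_none_iff_not_mem_keys, hkeysB, ← hmem, hperm.mem_iff]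
        exact hi
      rw [hA, hB]
  rw [hlen]
  exact List.map_congr_left (fun a _ => hget a)

-- ===== VERDICT (by name: the statement is the Claim_ definition above) =====
theorem get_cluster_size_distr_spec : Claim_equal_get_cluster_size_distr := by
  intro cd _
  unfold Spec_get_cluster_size_distr
  exact pv_main cd
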